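-- pv_equiv track=rewrite | github.com/AnnaaKorzhenko/simplified-transformer | ltl_formulas/formula_until_single.py | evaluate_atom
-- ===== SOURCE A (Python) =====
-- from typing import Dict, List, Tuple
--
-- def evaluate_atom(sequence: List[str], a: str, b: str) -> bool:
--     if not sequence:
--         return False
--     pos_b = None
--     for i, sym in enumerate(sequence):
--         if sym == b and pos_b is None:
--             pos_b = i
--             break
--     if pos_b is None:
--         return False
--     return a not in sequence[:pos_b]
-- ===== SOURCE B (Python) =====
-- def evaluate_atom(sequence, a, b):
--     for sym in sequence:
--         if sym == b:
--             return True
--         if sym == a: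
--             return False
--     return False
-- ===== Notes on version B (the rewrite author's own statement) =====
-- stated objective: simpler
-- what changed: Replaces A's two-phase scan (find the index of the first b, then re-scan the prefix slice for a) with one interleaved pass that keeps no index and builds no slice, testing b before a so the a==b case still yields True.
import Mathlib
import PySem

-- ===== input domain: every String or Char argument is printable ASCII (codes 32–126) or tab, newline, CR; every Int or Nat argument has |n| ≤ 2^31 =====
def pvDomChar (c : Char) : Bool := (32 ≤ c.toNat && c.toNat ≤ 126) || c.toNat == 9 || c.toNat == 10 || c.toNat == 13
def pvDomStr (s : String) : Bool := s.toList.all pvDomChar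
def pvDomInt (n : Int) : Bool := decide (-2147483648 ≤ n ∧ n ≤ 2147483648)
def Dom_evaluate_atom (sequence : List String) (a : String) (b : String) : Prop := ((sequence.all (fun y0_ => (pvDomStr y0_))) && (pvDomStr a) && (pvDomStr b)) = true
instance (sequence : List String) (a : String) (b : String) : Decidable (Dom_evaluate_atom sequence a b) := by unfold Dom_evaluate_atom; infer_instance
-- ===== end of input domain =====

-- B replaces A's find-index-then-rescan-prefix with a single interleaved scan (simpler; same O(n) cost).


-- ===== PORT A =====
-- the 'for i, sym in enumerate(sequence): if sym == b and pos_b is None: pos_b = i; break' loop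
def pvFindB : List (Int × String) → String → Option Int
  | [], _ => none
  | (i, sym) :: rest, b => if sym = b then some i else pvFindB rest b

def evaluate_atom (sequence : List String) (a : String) (b : String) : Bool :=
  if sequence = [] then false
  else
    match pvFindB (PySem.List.enumerate sequence) b with
    | none => false
    | some pos_b => !((PySem.List.slice sequence none (some pos_b)).contains a)

-- ===== PORT B =====
def evaluate_atom_alt (sequence : List String) (a : String) (b : String) : Bool :=
  match sequence with
  | [] => false
  | sym :: rest => if sym = b then true else if sym = a then false else evaluate_atom_alt rest a b

-- ===== PRECONDITION & SPEC =====
def Spec_evaluate_atom (sequence : List String) (a : String) (b : String) (out : Bool) : Prop := out = evaluate_atom_alt sequence a b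
instance (sequence : List String) (a : String) (b : String) (out : Bool) : Decidable (Spec_evaluate_atom sequence a b out) := by unfold Spec_evaluate_atom; infer_instance

-- ===== CLAIM (what is proved, stated in full; the proofs are below) =====
def Claim_equal_evaluate_atom : Prop := ∀ (sequence : List String) (a : String) (b : String), Dom_evaluate_atom sequence a b → Spec_evaluate_atom sequence a b (evaluate_atom sequence a b)

-- ===== LEMMAS AND PROOFS =====

-- A's loop returns s + (first index of b), computed via findIdx?
lemma pvFindB_enumerate (xs : List String) (b : String) (s : Int) :
    pvFindB (PySem.List.enumerate xs s) b
      = (xs.findIdx? (fun x => x == b)).map (fun k => s + (k : Int)) := by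
  induction xs generalizing s with
  | nil => simp [PySem.List.enumerate_nil, pvFindB]
  | cons x xs ih =>
    rw [PySem.List.enumerate_cons]
    by_cases hx : x = b
    · simp [pvFindB, hx, List.findIdx?_cons]
    · simp only [pvFindB, if_neg hx, ih, List.findIdx?_cons, beq_iff_eq, hx, if_false,
        cond_false, Option.map_map]
      cases xs.findIdx? (fun x => x == b) <;> simp <;> push_cast <;> ring

lemma evaluate_atom_eq (xs : List String) (a b : String) :
    evaluate_atom xs a b
      = match xs.findIdx? (fun x => x == b) with
        | none => false
        | some k => !((xs.take k).contains a) := by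
  unfold evaluate_atom
  rcases hx : xs with _ | ⟨y, ys⟩
  · simp
  rw [if_neg (by simp), pvFindB_enumerate _ _ 0]
  cases h : (y :: ys).findIdx? (fun x => x == b) with
  | none => simp [h]
  | some k =>
    simp only [h, Option.map, Option.bind_eq_bind, Option.bind_some, zero_add]
    rw [PySem.List.slice_to_natCast]

lemma eval_eq_alt (xs : List String) (a b : String) :
    evaluate_atom xs a b = evaluate_atom_alt xs a b := by
  induction xs with
  | nil => simp [evaluate_atom, evaluate_atom_alt]
  | cons x xs ih =>
    rw [evaluate_atom_eq] at *
    rw [List.findIdx?_cons]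
    by_cases hb : x = b
    · simp [evaluate_atom_alt, hb]
    · simp only [beq_iff_eq, hb, if_false, cond_false]
      by_cases ha : x = a
      · subst ha
        cases h : xs.findIdx? (fun y => y == b) <;>
          simp [evaluate_atom_alt, hb, List.take_succ_cons]
      · rw [show evaluate_atom_alt (x :: xs) a b = evaluate_atom_alt xs a b by
          simp [evaluate_atom_alt, hb, ha], ← ih]
        cases h : xs.findIdx? (fun y => y == b) with
        | none => simp [h]
        | some k =>
          have hax : (a == x) = false := by
            simp only [beq_eq_false_iff_ne]; exact fun e => ha e.symm
          simp [h, List.take_succ_cons, hax]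
          exact fun _ e => ha e.symm

-- ===== VERDICT (by name: the statement is the Claim_ definition above) =====
theorem evaluate_atom_spec : Claim_equal_evaluate_atom := by
  intro xs a b _
  unfold Spec_evaluate_atom
  exact eval_eq_alt xs a b
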